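-- pv_equiv track=rewrite | github.com/Baidu-Post-Bar-Python/CodeForBegginers | drink_water.py | drink
-- ===== SOURCE A (Python) =====
-- def drink(water, caps, bottles):            # 参数含义和while循环的实现基本相同
--     water += caps // 3                      # 瓶盖换水
--     caps = caps % 3                         # 留下余数个瓶盖
--     water += bottles // 2                   # 空瓶换水
--     bottles = bottles % 2                   # 留下余数个空瓶
--     if water == 0:                          # 无水可喝，是递归的终点
--         return 0
--     caps += water                           # 产生瓶盖
--     bottles += water                        # 产生空瓶
--     return water + drink(0, caps, bottles)  # 总的喝水数量是现在的水加上喝完以后能喝的水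
-- ===== SOURCE B (Python) =====
-- def drink(water, caps, bottles):
--     # First exchange round uses the incoming water; afterwards the state is only (caps, bottles).
--     gained = water + caps // 3 + bottles // 2
--     if gained == 0:
--         return 0
--     caps, bottles, total = caps % 3 + gained, bottles % 2 + gained, gained
--     while True:
--         gained = caps // 3 + bottles // 2
--         if gained == 0:
--             return total
--         caps, bottles, total = caps % 3 + gained, bottles % 2 + gained, total + gained
-- ===== Notes on version B (the rewrite author's own statement) =====
-- stated objective: alternative
-- what changed: Replaces A's recursion over a 3-variable state (water, caps, bottles) by a peeled first round followed by an iterative while-loop over only (caps, bottles) with a running total, eliminating the water variable from the loop state.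
import Mathlib
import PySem

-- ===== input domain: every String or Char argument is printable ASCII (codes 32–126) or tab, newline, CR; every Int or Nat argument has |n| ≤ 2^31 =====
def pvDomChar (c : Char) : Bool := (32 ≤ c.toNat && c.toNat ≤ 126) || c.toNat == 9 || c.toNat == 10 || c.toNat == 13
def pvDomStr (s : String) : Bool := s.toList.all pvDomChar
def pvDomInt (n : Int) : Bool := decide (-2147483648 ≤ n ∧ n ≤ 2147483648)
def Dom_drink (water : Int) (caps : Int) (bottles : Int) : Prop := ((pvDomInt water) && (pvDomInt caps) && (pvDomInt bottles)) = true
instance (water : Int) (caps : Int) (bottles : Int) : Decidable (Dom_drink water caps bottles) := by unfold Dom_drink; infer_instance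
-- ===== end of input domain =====

-- B replaces A's 3-state recursion by a first-round prologue plus an iterative loop over
-- the 2-variable state (caps, bottles) with a running total (alternative decomposition, same cost).


-- ===== PORT A =====
-- Fuel bound for A's recursion: on the whole domain the depth is far below this linear bound
-- (each non-final round drinks at least one unit drawn from the initial stock, and with
-- negative stock the state magnitudes shrink geometrically).
def drinkFuelBound (water : Int) (caps : Int) (bottles : Int) : Nat :=
  6 * (water.natAbs + caps.natAbs + bottles.natAbs) + 1

-- literal transliteration of A's recursion, fuel-guarded; the fuel above always suffices
def drinkRec : Nat → Int → Int → Int → Int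
  | 0, _, _, _ => 0
  | n + 1, water, caps, bottles =>
    let w1 := water + PySem.Int.floordiv caps 3
    let c1 := PySem.Int.mod caps 3
    let w2 := w1 + PySem.Int.floordiv bottles 2
    let b1 := PySem.Int.mod bottles 2
    if w2 = 0 then 0
    else w2 + drinkRec n 0 (c1 + w2) (b1 + w2)

def drink (water : Int) (caps : Int) (bottles : Int) : Int :=
  drinkRec (drinkFuelBound water caps bottles) water caps bottles

-- ===== PORT B =====
-- B's while-True loop: two-variable state (caps, bottles) plus accumulator `total`;
-- fuel-guarded with the same kind of linear bound (one step is peeled off as B's prologue).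
def drinkAltLoop : Nat → Int → Int → Int → Int
  | 0, _, _, total => total
  | n + 1, caps, bottles, total =>
    let gained := PySem.Int.floordiv caps 3 + PySem.Int.floordiv bottles 2
    if gained = 0 then total
    else drinkAltLoop n (PySem.Int.mod caps 3 + gained) (PySem.Int.mod bottles 2 + gained)
           (total + gained)

def drink_alt (water : Int) (caps : Int) (bottles : Int) : Int :=
  let gained := water + PySem.Int.floordiv caps 3 + PySem.Int.floordiv bottles 2
  if gained = 0 then 0
  else drinkAltLoop (6 * (water.natAbs + caps.natAbs + bottles.natAbs))
         (PySem.Int.mod caps 3 + gained) (PySem.Int.mod bottles 2 + gained) gained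

-- ===== PRECONDITION & SPEC =====
def Spec_drink (water : Int) (caps : Int) (bottles : Int) (out : Int) : Prop :=
  out = drink_alt water caps bottles
instance (water : Int) (caps : Int) (bottles : Int) (out : Int) : Decidable (Spec_drink water caps bottles out) := by
  unfold Spec_drink; infer_instance

-- ===== CLAIM (what is proved, stated in full; the proofs are below) =====
def Claim_equal_drink : Prop := ∀ (water : Int) (caps : Int) (bottles : Int), Dom_drink water caps bottles → Spec_drink water caps bottles (drink water caps bottles)

-- ===== LEMMAS AND PROOFS =====
-- At equal fuel, B's loop computes `total +` A's recursion started with zero incoming water.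
theorem drinkAltLoop_eq_add_drinkRec (n : Nat) :
    ∀ (caps bottles total : Int),
      drinkAltLoop n caps bottles total = total + drinkRec n 0 caps bottles := by
  induction n with
  | zero => intro caps bottles total; simp [drinkAltLoop, drinkRec]
  | succ n ih =>
    intro caps bottles total
    simp only [drinkAltLoop, drinkRec, zero_add]
    split
    · simp
    · rw [ih]; ring

-- ===== VERDICT (by name: the statement is the Claim_ definition above) =====
theorem drink_spec : Claim_equal_drink := by
  intro water caps bottles _
  unfold Spec_drink drink drink_alt drinkFuelBound
  simp only [drinkRec, drinkAltLoop_eq_add_drinkRec, add_assoc]
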